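-- pv_equiv track=rewrite | github.com/Lt-kang/Coding_test | 프로그래머스/lv1/12935. 제일 작은 수 제거하기/제일 작은 수 제거하기.py | solution
-- ===== SOURCE A (Python) =====
-- from collections import deque
--
-- def solution(arr):
--     mn = min(arr)
--     l = len(arr)
--     if l==1: return [-1]
--
--     arr = deque(arr)
--     check = 0
--     for i in range(l):
--         if arr[0]==mn: arr.popleft()
--         else: arr.append(arr.popleft())
--     return list(arr)
-- ===== SOURCE B (Python) =====
-- def solution(arr):
--     mn = min(arr)
--     if len(arr) == 1:
--         return [-1]
--     return [x for x in arr if x != mn]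
-- ===== Notes on version B (the rewrite author's own statement) =====
-- stated objective: simpler
-- what changed: Replaces the deque rotate-and-pop queue simulation with a single linear filter keeping all non-minimum elements in order.
import Mathlib
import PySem

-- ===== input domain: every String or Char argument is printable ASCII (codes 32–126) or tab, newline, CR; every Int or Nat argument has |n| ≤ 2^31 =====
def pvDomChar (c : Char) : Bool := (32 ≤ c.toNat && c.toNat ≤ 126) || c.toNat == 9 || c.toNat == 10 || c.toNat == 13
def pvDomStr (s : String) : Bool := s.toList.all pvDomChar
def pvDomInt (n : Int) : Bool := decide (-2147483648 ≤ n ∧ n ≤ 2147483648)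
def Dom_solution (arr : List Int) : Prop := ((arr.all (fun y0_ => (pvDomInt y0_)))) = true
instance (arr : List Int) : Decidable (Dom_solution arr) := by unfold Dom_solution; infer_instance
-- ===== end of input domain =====

-- B replaces A's deque rotate-and-pop simulation by a single filter keeping non-minimum elements in order (simpler, same cost).


-- ===== PORT A =====
-- 'for i in range(l)': pops the front each iteration; drop it if it equals mn, else append to back
def solRotLoop (mn : Int) : Nat → List Int → List Int
  | 0, d => d
  | n+1, d =>
    solRotLoop mn n (match d with
      | [] => []
      | x :: xs => if x == mn then xs else xs ++ [x])

def solution (arr : List Int) : List Int :=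
  match PySem.List.min? arr (fun x => x) with
  | none => []   -- unreachable under Pre_: min([]) raises ValueError
  | some mn =>
    let l := arr.length
    if l == 1 then [-1]
    else solRotLoop mn l arr

-- ===== PORT B =====
def solution_alt (arr : List Int) : List Int :=
  match PySem.List.min? arr (fun x => x) with
  | none => []   -- unreachable under Pre_: min([]) raises ValueError
  | some mn =>
    if arr.length == 1 then [-1]
    else arr.filter (fun x => x != mn)

-- ===== PRECONDITION & SPEC =====
-- Pre_ excludes only the empty list, on which both A and B raise ValueError (min of empty sequence).
def Pre_solution (arr : List Int) : Prop := arr ≠ []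
instance (arr : List Int) : Decidable (Pre_solution arr) := by unfold Pre_solution; infer_instance
def pvWitness_solution : List Int := [4, 3, 2, 1]

def Spec_solution (arr : List Int) (out : List Int) : Prop := out = solution_alt arr
instance (arr : List Int) (out : List Int) : Decidable (Spec_solution arr out) := by unfold Spec_solution; infer_instance

-- ===== CLAIM (what is proved, stated in full; the proofs are below) =====
def Claim_equal_solution : Prop := ∀ (arr : List Int), Dom_solution arr → Pre_solution arr → Spec_solution arr (solution arr)

-- ===== LEMMAS AND PROOFS =====
-- Invariant of the rotate loop: running it pending.length steps on (pending ++ done)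
-- yields done followed by the non-minimum elements of pending, in order.
theorem solRotLoop_invariant (mn : Int) (pending done : List Int) :
    solRotLoop mn pending.length (pending ++ done) = done ++ pending.filter (fun x => x != mn) := by
  induction pending generalizing done with
  | nil => simp [solRotLoop]
  | cons x xs ih =>
    simp only [List.length_cons, solRotLoop, List.cons_append]
    by_cases h : x == mn
    · simp [h, ih done, List.filter_cons]
      simp at h
      simp [h]
    · simp only [if_neg h, List.append_assoc]
      rw [ih (done ++ [x]), List.filter_cons]
      simp_all

theorem solution_eq_alt (arr : List Int) (_h : arr ≠ []) : solution arr = solution_alt arr := by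
  unfold solution solution_alt
  cases hm : PySem.List.min? arr (fun x => x) with
  | none => rfl
  | some mn =>
    by_cases hl : arr.length == 1
    · simp [hl]
    · simpa [hl] using solRotLoop_invariant mn arr []

-- ===== VERDICT (by name: the statement is the Claim_ definition above) =====
theorem solution_spec : Claim_equal_solution := by
  intro arr _ hpre
  exact solution_eq_alt arr hpre
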